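-- pv_equiv track=rewrite | github.com/itsmecharliev/bookbot | stats.py | get_num_chars
-- ===== SOURCE A (Python) =====
-- def get_num_chars(text):
--     chars = {}
--     for char in text:
--         char = char.lower()
--         if char in chars:
--             chars[char] += 1
--         else:
--             if char.isprintable():
--                 chars[char] = 1
--
--     return chars
-- ===== SOURCE B (Python) =====
-- def get_num_chars(text):
--     low = [c.lower() for c in text]
--     return {c: low.count(c) for c in dict.fromkeys(low) if c.isprintable()}
-- ===== Notes on version B (the rewrite author's own statement) =====
-- stated objective: alternative
-- what changed: B replaces A's incremental dict-of-counters loop by a dedup-then-count scheme: it lowercases once, takes the ordered distinct characters with dict.fromkeys, and maps each printable one to its total count via list.count.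
import Mathlib
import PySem

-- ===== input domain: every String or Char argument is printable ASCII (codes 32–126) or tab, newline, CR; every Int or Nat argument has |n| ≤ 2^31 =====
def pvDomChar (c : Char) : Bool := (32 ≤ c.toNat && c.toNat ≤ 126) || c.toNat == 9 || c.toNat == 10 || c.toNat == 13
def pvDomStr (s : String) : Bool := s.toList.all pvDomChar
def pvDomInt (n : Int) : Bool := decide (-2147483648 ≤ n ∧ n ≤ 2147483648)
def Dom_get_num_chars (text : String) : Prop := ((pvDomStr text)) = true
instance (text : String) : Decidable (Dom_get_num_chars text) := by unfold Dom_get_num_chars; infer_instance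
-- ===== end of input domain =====

-- B builds the result by ordered dedup + per-character counting instead of A's incremental counter dict; same return value.

-- shared helpers (both Pythons use c.lower() and str.isprintable())
-- c.lower() on a one-character string
def pvLower1 (c : Char) : String := PySem.Str.lower (String.mk [c])
-- str.isprintable(): exact on the ASCII domain (codes 32–126 printable; tab/newline/CR not)
def pvPrintable (s : String) : Bool := s.toList.all (fun c => 32 ≤ c.toNat && c.toNat ≤ 126)

-- ===== PORT A =====
-- the body of A's for-loop
def pvAStep (chars : PySem.Dict String Int) (c : Char) : PySem.Dict String Int :=
  let ch := pvLower1 c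
  match PySem.Dict.get? chars ch with
  | some v => PySem.Dict.insert chars ch (v + 1)
  | none => if pvPrintable ch then PySem.Dict.insert chars ch 1 else chars

def get_num_chars (text : String) : List (String × Int) :=
  (text.toList.foldl pvAStep (PySem.Dict.mk [])).items

-- ===== PORT B =====
def get_num_chars_alt (text : String) : List (String × Int) :=
  let low := text.toList.map pvLower1
  ((PySem.List.dedup low).filter pvPrintable).map (fun s => (s, (PySem.List.count low s : Int)))

-- ===== PRECONDITION & SPEC =====
def Spec_get_num_chars (text : String) (out : List (String × Int)) : Prop := out = get_num_chars_alt text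
instance (text : String) (out : List (String × Int)) : Decidable (Spec_get_num_chars text out) := by unfold Spec_get_num_chars; infer_instance

-- ===== CLAIM (what is proved, stated in full; the proofs are below) =====
def Claim_equal_get_num_chars : Prop := ∀ (text : String), Dom_get_num_chars text → Spec_get_num_chars text (get_num_chars text)

-- ===== LEMMAS AND PROOFS =====

-- B's value as a function of the lowered key list
def pvTgt (low : List String) : List (String × Int) :=
  ((PySem.List.dedup low).filter pvPrintable).map (fun s => (s, (PySem.List.count low s : Int)))

lemma pvFind_beq {α : Type} [BEq α] [LawfulBEq α] (l : List α) (s : α) :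
    l.find? (fun x => x == s) = if s ∈ l then some s else none := by
  induction l with
  | nil => simp
  | cons a t ih =>
    by_cases h : a = s
    · simp [h, List.find?]
    · rw [List.find?_cons_of_neg (by simp [h]), ih]
      simp [List.mem_cons, Ne.symm h]

lemma pvMem_dedup (low : List String) (s : String) :
    s ∈ PySem.List.dedup low ↔ s ∈ low := PySem.Set.mem_ofList low s

lemma pvMem_keys (low : List String) (s : String) :
    s ∈ (PySem.List.dedup low).filter pvPrintable ↔ s ∈ low ∧ pvPrintable s = true := by
  rw [List.mem_filter, pvMem_dedup]

lemma pvDedup_append (low : List String) (s : String) :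
    PySem.List.dedup (low ++ [s]) =
      if s ∈ low then PySem.List.dedup low else PySem.List.dedup low ++ [s] := by
  show PySem.Set.ofList (low ++ [s]) = _
  rw [PySem.Set.ofList, List.foldl_append, List.foldl_cons, List.foldl_nil]
  show PySem.Set.add (PySem.Set.ofList low) s = _
  have hc : PySem.Set.contains (PySem.Set.ofList low) s = decide (s ∈ low) := by
    rw [PySem.Set.contains]
    by_cases h : s ∈ low
    · simp only [h, decide_true]
      exact List.contains_iff_mem.2 ((pvMem_dedup low s).2 h)
    · simp only [h, decide_false]
      rw [Bool.eq_false_iff]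
      intro hx
      exact h ((pvMem_dedup low s).1 (List.contains_iff_mem.1 hx))
  rw [PySem.Set.add, hc]
  by_cases h : s ∈ low
  · rw [if_pos (by simp [h]), if_pos h]
    rfl
  · rw [if_neg (by simp [h]), if_neg h]
    rfl

lemma pvCount_ne (low : List String) (s t : String) (hts : t ≠ s) :
    PySem.List.count (low ++ [s]) t = PySem.List.count low t := by
  simp [PySem.List.count, List.count_append, Ne.symm hts]

lemma pvCount_new (low : List String) (s : String) (hm : s ∉ low) :
    PySem.List.count (low ++ [s]) s = 1 := by
  simp [PySem.List.count, List.count_append, List.count_eq_zero, hm]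

lemma pvGet?_tgt (low : List String) (s : String) :
    PySem.Dict.get? ⟨pvTgt low⟩ s =
      if s ∈ low ∧ pvPrintable s = true then some ((PySem.List.count low s : Int)) else none := by
  show Option.map (fun p => p.2) (List.find? (fun p => p.1 == s) (pvTgt low)) = _
  rw [pvTgt, List.find?_map]
  have hcomp : ((fun (p : String × Int) => p.1 == s) ∘ fun t => (t, (PySem.List.count low t : Int)))
      = fun t => t == s := rfl
  rw [hcomp, pvFind_beq]
  by_cases h : s ∈ low ∧ pvPrintable s = true
  · rw [if_pos ((pvMem_keys low s).2 h), if_pos h]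
    rfl
  · rw [if_neg ((pvMem_keys low s).not.2 h), if_neg h]
    rfl

lemma pvContains_tgt (low : List String) (s : String) :
    PySem.Dict.contains ⟨pvTgt low⟩ s = decide (s ∈ low ∧ pvPrintable s = true) := by
  show (pvTgt low).any (fun p => p.1 == s) = _
  rw [pvTgt, List.any_map]
  have hcomp : ((fun (p : String × Int) => p.1 == s) ∘ fun t => (t, (PySem.List.count low t : Int)))
      = fun t => t == s := rfl
  rw [hcomp]
  by_cases h : s ∈ low ∧ pvPrintable s = true
  · rw [decide_eq_true h, List.any_eq_true]
    exact ⟨s, (pvMem_keys low s).2 h, by simp⟩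
  · rw [decide_eq_false h, List.any_eq_false]
    intro x hx
    simp only [beq_iff_eq]
    intro he
    exact h (he ▸ (pvMem_keys low x).1 hx)

lemma pvStep (low : List String) (s : String) :
    pvTgt (low ++ [s]) =
      (match PySem.Dict.get? ⟨pvTgt low⟩ s with
       | some v => PySem.Dict.insert ⟨pvTgt low⟩ s (v + 1)
       | none => if pvPrintable s then PySem.Dict.insert ⟨pvTgt low⟩ s 1 else (⟨pvTgt low⟩ : PySem.Dict String Int)).items := by
  by_cases hm : s ∈ low <;> by_cases hp : pvPrintable s = true
  · -- seen and printable: A overwrites the entry in place, B bumps the count at the same key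
    rw [pvGet?_tgt, if_pos ⟨hm, hp⟩]
    show _ = (PySem.Dict.insert ⟨pvTgt low⟩ s ((PySem.List.count low s : Int) + 1)).items
    rw [PySem.Dict.insert, pvContains_tgt, if_pos (by simp [hm, hp])]
    show _ = List.map _ (pvTgt low)
    rw [pvTgt, pvTgt, pvDedup_append, if_pos hm, List.map_map]
    apply List.map_congr_left
    intro t ht
    by_cases hts : t = s
    · subst hts
      simp [Function.comp]
    · simp [Function.comp, beq_iff_eq, hts, List.count_eq_zero]
  · -- seen but not printable: not a key of the dict; both sides unchanged
    rw [pvGet?_tgt, if_neg (by simp [hp])]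
    show _ = (if pvPrintable s = true then PySem.Dict.insert ⟨pvTgt low⟩ s 1 else (⟨pvTgt low⟩ : PySem.Dict String Int)).items
    rw [if_neg hp]
    show _ = pvTgt low
    rw [pvTgt, pvTgt, pvDedup_append, if_pos hm]
    apply List.map_congr_left
    intro t ht
    have hts : t ≠ s := fun he => hp (he ▸ ((pvMem_keys low t).1 ht).2)
    rw [pvCount_ne low s t hts]
  · -- new and printable: both sides append the new key with count 1
    rw [pvGet?_tgt, if_neg (by simp [hm])]
    show _ = (if pvPrintable s = true then PySem.Dict.insert ⟨pvTgt low⟩ s 1 else (⟨pvTgt low⟩ : PySem.Dict String Int)).items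
    rw [if_pos hp, PySem.Dict.insert, pvContains_tgt, if_neg (by simp [hm])]
    show _ = pvTgt low ++ [(s, 1)]
    rw [pvTgt, pvTgt, pvDedup_append, if_neg hm, List.filter_append, List.filter_singleton]
    simp only [hp, cond_true, List.map_append]
    congr 1
    · apply List.map_congr_left
      intro t ht
      have hts : t ≠ s := fun he => hm (he ▸ ((pvMem_keys low t).1 ht).1)
      rw [pvCount_ne low s t hts]
    · rw [List.map_singleton, pvCount_new low s hm]
      norm_num
  · -- new and not printable: skipped by both sides
    rw [pvGet?_tgt, if_neg (by simp [hm])]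
    show _ = (if pvPrintable s = true then PySem.Dict.insert ⟨pvTgt low⟩ s 1 else (⟨pvTgt low⟩ : PySem.Dict String Int)).items
    rw [if_neg hp]
    show _ = pvTgt low
    rw [pvTgt, pvTgt, pvDedup_append, if_neg hm, List.filter_append, List.filter_singleton]
    rw [Bool.not_eq_true] at hp
    simp only [hp, cond_false, List.append_nil]
    apply List.map_congr_left
    intro t ht
    have hts : t ≠ s := fun he => hm (he ▸ ((pvMem_keys low t).1 ht).1)
    rw [pvCount_ne low s t hts]

lemma pvInvariant (l : List Char) :
    (l.foldl pvAStep (PySem.Dict.mk [])).items = pvTgt (l.map pvLower1) := by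
  induction l using List.reverseRecOn with
  | nil => simp [pvTgt, PySem.List.dedup, PySem.Set.ofList, PySem.Set.empty]
  | append_singleton t c ih =>
    rw [List.foldl_append, List.foldl_cons, List.foldl_nil, List.map_append]
    have hd : (t.foldl pvAStep (PySem.Dict.mk [])) = (⟨pvTgt (t.map pvLower1)⟩ : PySem.Dict String Int) := by
      cases hE : t.foldl pvAStep (PySem.Dict.mk []) with
      | mk items =>
        rw [hE] at ih
        exact congrArg PySem.Dict.mk ih
    rw [hd, List.map_cons, List.map_nil]
    rw [pvStep]
    rfl

-- ===== VERDICT (by name: the statement is the Claim_ definition above) =====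
theorem get_num_chars_spec : Claim_equal_get_num_chars := by
  intro text _
  show _ = _
  rw [get_num_chars, pvInvariant]
  rfl
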